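-- pv_equiv track=rewrite | github.com/voka/Backjoon | 20220402/프로그래머스 데브매칭-2.py | solution
-- ===== SOURCE A (Python) =====
-- from collections import deque
-- from itertools import product
--
-- dx = [1,-1,0,0]
--
-- dy = [0,0,1,-1]
--
-- def solution(grid):
--     N,M = len(grid),len(grid[0])
--     qcount = 0
--     answer = 0
--     qindex = []
--
--     Myground = {}
--
--     for i in range(N):
--         if 'a' in grid[i]:
--             Myground['a'] = 0
--         if 'b' in grid[i]:
--             Myground['b'] = 0
--         if 'c' in grid[i]:
--             Myground['c'] = 0
--         grid[i] = list(grid[i])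
--
--         for j in range(M):
--             if grid[i][j] == '?':
--                 qcount += 1
--                 qindex.append([i,j])
--     testcase = product(['a','b','c'],repeat=qcount)
--     pools = [tuple(pool) for pool in testcase]
--     for pool in pools:
--         new_key = {}
--         for key in Myground:
--             new_key[key] = 0
--         if 'a' not in new_key and  'a' in pool :
--             new_key['a'] = 0
--         if 'b' not in new_key and 'b' in pool:
--             new_key['b'] = 0
--         if 'c' not in new_key and 'c' in pool:
--             new_key['c'] = 0
--
--         for i in range(qcount):
--             grid[qindex[i][0]][qindex[i][1]] = pool[i]
--
--         visited = [[0]*(M) for _ in range(N)]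
--
--         def BFS(x,y):
--             target = grid[x][y]
--             myque = deque()
--             myque.append((x,y))
--             while myque:
--                 cur_x,cur_y = myque.popleft()
--                 for i in range(4):
--                     next_x,next_y = cur_x + dx[i], cur_y + dy[i]
--                     if 0 <= next_x < N and 0 <= next_y < M:
--                         if visited[next_x][next_y] == 0 :
--                             if grid[next_x][next_y] == target :
--                                 visited[next_x][next_y] = 1
--                                 myque.append((next_x,next_y))
--         count = 0
--         for i in range(N):
--             for j in range(M):
--                 if visited[i][j] == 0:
--                     visited[i][j] = 1
--                     BFS(i,j)
--                     new_key[grid[i][j]] += 1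
--
--         cnt = 0
--         for key in new_key:
--             if new_key[key] == 1:
--                 continue
--             else:
--                 cnt = -1
--                 break
--         if cnt == 0 :
--             answer += 1
--
--     return answer
-- ===== SOURCE B (Python) =====
-- from itertools import product
--
--
-- def solution(grid):
--     N, M = len(grid), len(grid[0])
--     qcells = [(i, j) for i in range(N) for j in range(M) if grid[i][j] == '?']
--     base = {c for row in grid for c in 'abc' if c in row}
--
--     def one_region(cells):
--         region = {cells[0]}
--         for _ in range(len(cells)):
--             added = [(i, j) for (i, j) in cells
--                      if (i, j) not in region and
--                         ((i + 1, j) in region or (i - 1, j) in region or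
--                          (i, j + 1) in region or (i, j - 1) in region)]
--             if not added:
--                 break
--             region.update(added)
--         return len(region) == len(cells)
--
--     answer = 0
--     for pool in product('abc', repeat=len(qcells)):
--         fill = dict(zip(qcells, pool))
--         colors = {}
--         for i in range(N):
--             for j in range(M):
--                 c = fill[(i, j)] if (i, j) in fill else grid[i][j]
--                 colors.setdefault(c, []).append((i, j))
--         keys = base | set(pool)
--         if all(k in colors and one_region(colors[k]) for k in keys):
--             answer += 1
--     return answer
-- ===== Notes on version B (the rewrite author's own statement) =====
-- stated objective: alternative
-- what changed: Replaces the visited-matrix + deque BFS flood fill that counts components of every color with a per-color cell dictionary built in one pass and a set-growing closure: a coloring is valid iff for each required color the region grown from its first cell covers all of its cells; A's in-place mutation of grid is not reproduced (return value equivalence only).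
import Mathlib
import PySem

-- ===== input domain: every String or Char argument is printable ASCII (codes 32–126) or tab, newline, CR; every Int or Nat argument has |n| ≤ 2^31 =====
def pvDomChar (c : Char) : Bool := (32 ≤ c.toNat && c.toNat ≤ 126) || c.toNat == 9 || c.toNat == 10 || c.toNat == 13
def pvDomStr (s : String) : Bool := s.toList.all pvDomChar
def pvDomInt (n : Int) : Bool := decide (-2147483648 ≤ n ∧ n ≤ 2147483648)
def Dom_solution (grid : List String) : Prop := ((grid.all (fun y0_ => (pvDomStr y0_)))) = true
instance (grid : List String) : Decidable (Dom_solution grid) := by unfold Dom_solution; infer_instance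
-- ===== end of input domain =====

-- B replaces A's visited-matrix/deque BFS component counting with per-color cell lists and a
-- set-growing closure ("first cell's region covers all cells of the color"); return-value
-- equivalence only: A mutates its argument's rows in place, B does not.

-- ===== PORT A =====
-- shared 2D access helper (all reads/writes below are bounds-guarded nonnegative indices)
def cellAt (g : List (List Char)) (i j : Int) : Char :=
  (g.getD i.toNat []).getD j.toNat '!'

-- row-major cell sequence of the two nested `for i in range(N): for j in range(M)` loops
def cellList (N M : Nat) : List (Int × Int) :=
  (List.range N).flatMap (fun (i : Nat) => (List.range M).map (fun (j : Nat) => ((i : Int), (j : Int))))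

def pvDx : List Int := [1, -1, 0, 0]
def pvDy : List Int := [0, 0, 1, -1]

def vGet (v : List (List Int)) (i j : Int) : Int := (v.getD i.toNat []).getD j.toNat 0
def vSet (v : List (List Int)) (i j : Int) : List (List Int) :=
  v.set i.toNat ((v.getD i.toNat []).set j.toNat 1)

-- the `for i in range(4)` body of A's BFS, applied to the popped cell c
def bfsStep (g : List (List Char)) (N M : Nat) (target : Char)
    (st : List (Int × Int) × List (List Int)) (c : Int × Int) :
    List (Int × Int) × List (List Int) :=
  (List.range 4).foldl (fun st k =>
    let nx := c.1 + pvDx.getD k 0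
    let ny := c.2 + pvDy.getD k 0
    if 0 ≤ nx ∧ nx < (N : Int) ∧ 0 ≤ ny ∧ ny < (M : Int) then
      if vGet st.2 nx ny = 0 then
        if cellAt g nx ny = target then (st.1 ++ [(nx, ny)], vSet st.2 nx ny) else st
      else st
    else st) st

-- A's `while myque:` loop; fuel 5*N*M+1 dominates the measure 5*(#unvisited)+|queue|
def bfsLoop (g : List (List Char)) (N M : Nat) (target : Char) :
    Nat → List (Int × Int) → List (List Int) → List (List Int)
  | _, [], v => v
  | 0, _ :: _, v => v
  | fuel + 1, c :: rest, v =>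
      let st := bfsStep g N M target (rest, v) c
      bfsLoop g N M target fuel st.1 st.2

-- A's per-cell body of the component-count loop: flood fill from an unvisited cell, bump its color
def floodStep (g : List (List Char)) (N M : Nat)
    (st : List (List Int) × PySem.Dict Char Int) (p : Int × Int) :
    List (List Int) × PySem.Dict Char Int :=
  if vGet st.1 p.1 p.2 = 0 then
    let v1 := vSet st.1 p.1 p.2
    let tgt := cellAt g p.1 p.2
    let v2 := bfsLoop g N M tgt (5 * N * M + 1) [p] v1
    (v2, PySem.Dict.modify st.2 tgt 0 (· + 1))
  else st

-- A's per-pool body: visited matrix, flood fill, component counts, final all-ones test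
def checkA (g : List (List Char)) (N M : Nat) (keys : List Char) : Bool :=
  let nk0 : PySem.Dict Char Int := keys.foldl (fun d k => PySem.Dict.insert d k 0) PySem.Dict.empty
  let st := (cellList N M).foldl (floodStep g N M)
    (List.replicate N (List.replicate M (0 : Int)), nk0)
  keys.all (fun k => PySem.Dict.getD st.2 k 0 == 1)

def fillGrid (rows : List (List Char)) (assign : List ((Int × Int) × Char)) : List (List Char) :=
  assign.foldl (fun g pc =>
    g.set pc.1.1.toNat ((g.getD pc.1.1.toNat []).set pc.1.2.toNat pc.2)) rows

-- itertools.product('abc', repeat=n), in itertools order (shared: both Pythons call it)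
def pyProduct3 : Nat → List (List Char)
  | 0 => [[]]
  | n + 1 => ['a', 'b', 'c'].flatMap (fun c => (pyProduct3 n).map (fun p => c :: p))

def solution (grid : List String) : Int :=
  match grid with
  | [] => 0
  | g0 :: _ =>
    let N := grid.length
    let M := g0.length
    let rows := grid.map String.toList
    let myground : List Char := grid.foldl (fun mg s =>
        ['a', 'b', 'c'].foldl (fun mg c =>
          if c ∈ s.toList ∧ c ∉ mg then mg ++ [c] else mg) mg) []
    let qindex : List (Int × Int) :=
      (cellList N M).filter (fun p => cellAt rows p.1 p.2 = '?')
    (pyProduct3 qindex.length).foldl (fun answer pool =>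
      let keys := myground ++ (['a', 'b', 'c'].filter (fun c => c ∉ myground ∧ c ∈ pool))
      let g' := fillGrid rows (qindex.zip pool)
      if checkA g' N M keys then answer + 1 else answer) 0

-- ===== PORT B =====
-- grow the region from the seed set by repeatedly absorbing cells adjacent to it
def growRegion (cells : List (Int × Int)) : Nat → List (Int × Int) → List (Int × Int)
  | 0, region => region
  | fuel + 1, region =>
      let added := cells.filter (fun p =>
        p ∉ region ∧ ((p.1 + 1, p.2) ∈ region ∨ (p.1 - 1, p.2) ∈ region ∨
                      (p.1, p.2 + 1) ∈ region ∨ (p.1, p.2 - 1) ∈ region))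
      if added.isEmpty then region else growRegion cells fuel (region ++ added)

def oneRegion (cells : List (Int × Int)) : Bool :=
  match cells with
  | [] => false
  | c0 :: _ => (growRegion cells cells.length [c0]).length == cells.length

-- B's colors dict: color -> its cells in row-major order (setdefault/append loop)
def colorCells (rows : List (List Char)) (N M : Nat) (fill : PySem.Dict (Int × Int) Char) :
    PySem.Dict Char (List (Int × Int)) :=
  ((cellList N M).map (fun p =>
      ((PySem.Dict.get? fill p).getD (cellAt rows p.1 p.2), p))).foldl
    (fun d cp => PySem.Dict.modify d cp.1 [] (· ++ [cp.2])) PySem.Dict.empty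

def solution_alt (grid : List String) : Int :=
  match grid with
  | [] => 0
  | g0 :: _ =>
    let N := grid.length
    let M := g0.length
    let rows := grid.map String.toList
    let qcells : List (Int × Int) :=
      (cellList N M).filter (fun p => cellAt rows p.1 p.2 = '?')
    let base := ['a', 'b', 'c'].filter (fun c => grid.any (fun row => c ∈ row.toList))
    (pyProduct3 qcells.length).foldl (fun answer pool =>
      let fill := PySem.Dict.ofList (qcells.zip pool)
      let colors := colorCells rows N M fill
      let keys := base ++ (['a', 'b', 'c'].filter (fun c => c ∉ base ∧ c ∈ pool))
      if keys.all (fun k =>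
          PySem.Dict.contains colors k &&
          oneRegion (PySem.Dict.getD colors k [])) then answer + 1 else answer) 0

-- ===== PRECONDITION & SPEC =====
-- Pre_ excludes exactly the inputs where Python A raises: the empty list (IndexError on grid[0]),
-- a row shorter than the first row (IndexError), and a cell among the first len(grid[0])
-- columns that is not 'a','b','c' or '?' (KeyError on new_key[...] += 1).
def Pre_solution (grid : List String) : Prop :=
  grid ≠ [] ∧ ∀ s ∈ grid, (grid.headD "").length ≤ s.length ∧
    ∀ j < (grid.headD "").length, s.toList.getD j ' ' ∈ ['a', 'b', 'c', '?']
instance (grid : List String) : Decidable (Pre_solution grid) := by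
  unfold Pre_solution; infer_instance
def pvWitness_solution : List String := ["a?", "bc"]

def Spec_solution (grid : List String) (out : Int) : Prop := out = solution_alt grid
instance (grid : List String) (out : Int) : Decidable (Spec_solution grid out) := by
  unfold Spec_solution; infer_instance

-- ===== CLAIM (what is proved, stated in full; the proofs are below) =====
def Claim_equal_solution : Prop :=
  ∀ (grid : List String), Dom_solution grid → Pre_solution grid →
    Spec_solution grid (solution grid)

-- ===== LEMMAS AND PROOFS =====


def inb (N M : Nat) (p : Int × Int) : Prop :=
  0 ≤ p.1 ∧ p.1 < (N : Int) ∧ 0 ≤ p.2 ∧ p.2 < (M : Int)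

def nbr (p q : Int × Int) : Prop :=
  q = (p.1 + 1, p.2) ∨ q = (p.1 - 1, p.2) ∨ q = (p.1, p.2 + 1) ∨ q = (p.1, p.2 - 1)

def adjR (g : List (List Char)) (N M : Nat) (p q : Int × Int) : Prop :=
  inb N M p ∧ inb N M q ∧ nbr p q ∧ cellAt g q.1 q.2 = cellAt g p.1 p.2

def Reach (g : List (List Char)) (N M : Nat) : Int × Int → Int × Int → Prop :=
  Relation.ReflTransGen (adjR g N M)

theorem nbr_symm {p q : Int × Int} (h : nbr p q) : nbr q p := by
  obtain ⟨a, b⟩ := p; obtain ⟨c, d⟩ := q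
  simp only [nbr, Prod.mk.injEq] at h ⊢
  omega

theorem adjR_symm {g : List (List Char)} {N M : Nat} {p q : Int × Int}
    (h : adjR g N M p q) : adjR g N M q p :=
  ⟨h.2.1, h.1, nbr_symm h.2.2.1, h.2.2.2.symm⟩

theorem reach_symm {g : List (List Char)} {N M : Nat} {p q : Int × Int}
    (h : Reach g N M p q) : Reach g N M q p :=
  Relation.ReflTransGen.symmetric (fun _ _ => adjR_symm) h

theorem reach_trans {g : List (List Char)} {N M : Nat} {p q r : Int × Int}
    (h1 : Reach g N M p q) (h2 : Reach g N M q r) : Reach g N M p r :=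
  Relation.ReflTransGen.trans h1 h2

theorem reach_cases {g : List (List Char)} {N M : Nat} {p q : Int × Int}
    (h : Reach g N M p q) :
    p = q ∨ (inb N M p ∧ inb N M q ∧ cellAt g q.1 q.2 = cellAt g p.1 p.2) := by
  induction h with
  | refl => exact Or.inl rfl
  | tail _ ha ih =>
      rcases ih with rfl | ⟨h1, h2, h3⟩
      · exact Or.inr ⟨ha.1, ha.2.1, ha.2.2.2⟩
      · exact Or.inr ⟨h1, ha.2.1, ha.2.2.2.trans h3⟩

theorem reach_inb {g : List (List Char)} {N M : Nat} {p q : Int × Int}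
    (h : Reach g N M p q) (hp : inb N M p) : inb N M q := by
  rcases reach_cases h with rfl | ⟨_, h2, _⟩
  · exact hp
  · exact h2

theorem reach_color {g : List (List Char)} {N M : Nat} {p q : Int × Int}
    (h : Reach g N M p q) : cellAt g q.1 q.2 = cellAt g p.1 p.2 := by
  rcases reach_cases h with rfl | ⟨_, _, h3⟩ <;> simp [*]

theorem mem_cellList {N M : Nat} {p : Int × Int} : p ∈ cellList N M ↔ inb N M p := by
  obtain ⟨a, b⟩ := p
  constructor
  · intro h
    simp only [cellList, List.mem_flatMap, List.mem_map] at h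
    obtain ⟨i, hi, j, hj, h⟩ := h
    rw [List.mem_range] at hi hj
    simp only [Prod.mk.injEq] at h
    obtain ⟨h1, h2⟩ := h
    refine ⟨?_, ?_, ?_, ?_⟩ <;> omega
  · rintro ⟨h1, h2, h3, h4⟩
    simp only [cellList, List.mem_flatMap, List.mem_map]
    refine ⟨a.toNat, ?_, b.toNat, ?_, ?_⟩
    · rw [List.mem_range]; omega
    · rw [List.mem_range]; omega
    · simp only [Prod.mk.injEq]; constructor <;> omega

theorem nodup_cellList (N M : Nat) : (cellList N M).Nodup := by
  rw [cellList, List.nodup_flatMap]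
  constructor
  · intro i _
    refine List.Nodup.map ?_ List.nodup_range
    intro x y h
    simpa using h
  · rw [List.pairwise_iff_getElem]
    intro i j hi hj hij
    simp only [Function.onFun]
    rw [List.disjoint_left]
    intro x hx hx2
    rw [List.mem_map] at hx hx2
    obtain ⟨c, hc, rfl⟩ := hx
    obtain ⟨d, hd, h⟩ := hx2
    simp only [List.getElem_range, Prod.mk.injEq] at h
    have := h.1
    omega

theorem length_cellList (N M : Nat) : (cellList N M).length = N * M := by
  simp [cellList]

def cellsOf (g : List (List Char)) (N M : Nat) (c : Char) : List (Int × Int) :=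
  (cellList N M).filter (fun p => cellAt g p.1 p.2 == c)

theorem mem_cellsOf {g : List (List Char)} {N M : Nat} {c : Char} {p : Int × Int} :
    p ∈ cellsOf g N M c ↔ inb N M p ∧ cellAt g p.1 p.2 = c := by
  simp [cellsOf, List.mem_filter, mem_cellList]

theorem nodup_cellsOf (g : List (List Char)) (N M : Nat) (c : Char) :
    (cellsOf g N M c).Nodup := (nodup_cellList N M).filter _


theorem nodup_subset_length {l1 l2 : List (Int × Int)} (h : l1.Nodup) (hs : l1 ⊆ l2) :
    l1.length ≤ l2.length := by
  calc l1.length = l1.toFinset.card := (List.toFinset_card_of_nodup h).symm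
    _ ≤ l2.toFinset.card := Finset.card_le_card (by intro x hx; simp at hx ⊢; exact hs hx)
    _ ≤ l2.length := List.toFinset_card_le l2

theorem subset_of_nodup_of_length {l1 l2 : List (Int × Int)} (h1 : l1.Nodup) (h2 : l2.Nodup)
    (hs : l1 ⊆ l2) (hl : l2.length ≤ l1.length) : l2 ⊆ l1 := by
  have e : l1.toFinset = l2.toFinset := by
    apply Finset.eq_of_subset_of_card_le
    · intro x hx; simp at hx ⊢; exact hs hx
    · rw [List.toFinset_card_of_nodup h1, List.toFinset_card_of_nodup h2]; exact hl
  intro x hx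
  have hx2 : x ∈ l2.toFinset := by simp [hx]
  rw [← e] at hx2; simpa using hx2

theorem nbrs_mem_iff {region : List (Int × Int)} {p : Int × Int} :
    ((p.1 + 1, p.2) ∈ region ∨ (p.1 - 1, p.2) ∈ region ∨
     (p.1, p.2 + 1) ∈ region ∨ (p.1, p.2 - 1) ∈ region) ↔ ∃ q ∈ region, nbr p q := by
  constructor
  · rintro (h | h | h | h)
    · exact ⟨_, h, Or.inl rfl⟩
    · exact ⟨_, h, Or.inr (Or.inl rfl)⟩
    · exact ⟨_, h, Or.inr (Or.inr (Or.inl rfl))⟩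
    · exact ⟨_, h, Or.inr (Or.inr (Or.inr rfl))⟩
  · rintro ⟨q, hq, (rfl | rfl | rfl | rfl)⟩ <;> tauto

theorem mem_grow_added {cells region : List (Int × Int)} {p : Int × Int} :
    p ∈ cells.filter (fun p =>
        decide (p ∉ region ∧ ((p.1 + 1, p.2) ∈ region ∨ (p.1 - 1, p.2) ∈ region ∨
                (p.1, p.2 + 1) ∈ region ∨ (p.1, p.2 - 1) ∈ region))) ↔
    p ∈ cells ∧ p ∉ region ∧ ∃ q ∈ region, nbr p q := by
  rw [List.mem_filter, decide_eq_true_iff, nbrs_mem_iff]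

theorem grow_sound {g : List (List Char)} {N M : Nat} {s : Int × Int} (hs : inb N M s) :
    ∀ (fuel : Nat) (region : List (Int × Int)),
      (∀ r ∈ region, Reach g N M s r) →
      ∀ r ∈ growRegion (cellsOf g N M (cellAt g s.1 s.2)) fuel region, Reach g N M s r := by
  intro fuel
  induction fuel with
  | zero => intro region hr r hrr; exact hr r hrr
  | succ n ih =>
      intro region hr r hrr
      rw [growRegion] at hrr
      by_cases he : (List.filter (fun p =>
          decide (p ∉ region ∧ ((p.1 + 1, p.2) ∈ region ∨ (p.1 - 1, p.2) ∈ region ∨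
            (p.1, p.2 + 1) ∈ region ∨ (p.1, p.2 - 1) ∈ region)))
          (cellsOf g N M (cellAt g s.1 s.2))).isEmpty
      · rw [if_pos he] at hrr; exact hr r hrr
      · rw [if_neg he] at hrr
        refine ih _ ?_ r hrr
        intro x hx
        rcases List.mem_append.1 hx with hx | hx
        · exact hr x hx
        · rw [mem_grow_added] at hx
          obtain ⟨hcell, _, q, hq, hnbr⟩ := hx
          obtain ⟨hinb, hcol⟩ := mem_cellsOf.1 hcell
          have hrq := hr q hq
          refine Relation.ReflTransGen.tail hrq ?_
          refine ⟨reach_inb hrq hs, hinb, nbr_symm hnbr, ?_⟩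
          rw [hcol, reach_color hrq]

theorem grow_mono {cells : List (Int × Int)} :
    ∀ (fuel : Nat) (region : List (Int × Int)), region ⊆ growRegion cells fuel region := by
  intro fuel
  induction fuel with
  | zero => intro region; exact fun x h => h
  | succ n ih =>
      intro region
      rw [growRegion]
      split
      · exact fun x h => h
      · exact fun x h => ih _ (List.mem_append.2 (Or.inl h))

theorem grow_nodup_subset {cells : List (Int × Int)} (hcn : cells.Nodup) :
    ∀ (fuel : Nat) (region : List (Int × Int)), region.Nodup →
      (growRegion cells fuel region).Nodup ∧
      ∀ x ∈ growRegion cells fuel region, x ∈ region ∨ x ∈ cells := by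
  intro fuel
  induction fuel with
  | zero => intro region hn; exact ⟨hn, fun x h => Or.inl h⟩
  | succ n ih =>
      intro region hn
      rw [growRegion]
      split
      · exact ⟨hn, fun x h => Or.inl h⟩
      · have hadded : ∀ x ∈ (List.filter (fun p =>
            decide (p ∉ region ∧ ((p.1 + 1, p.2) ∈ region ∨ (p.1 - 1, p.2) ∈ region ∨
              (p.1, p.2 + 1) ∈ region ∨ (p.1, p.2 - 1) ∈ region))) cells),
            x ∈ cells ∧ x ∉ region := by
          intro x hx; rw [mem_grow_added] at hx; exact ⟨hx.1, hx.2.1⟩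
        have hn' : (region ++ (List.filter (fun p =>
            decide (p ∉ region ∧ ((p.1 + 1, p.2) ∈ region ∨ (p.1 - 1, p.2) ∈ region ∨
              (p.1, p.2 + 1) ∈ region ∨ (p.1, p.2 - 1) ∈ region))) cells)).Nodup := by
          rw [List.nodup_append]
          refine ⟨hn, hcn.filter _, ?_⟩
          intro x hx y hy hxy
          subst hxy
          exact (hadded x hy).2 hx
        obtain ⟨h1, h2⟩ := ih _ hn'
        refine ⟨h1, fun x hx => ?_⟩
        rcases h2 x hx with hx2 | hx2
        · rcases List.mem_append.1 hx2 with hx3 | hx3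
          · exact Or.inl hx3
          · exact Or.inr (hadded x hx3).1
        · exact Or.inr hx2

theorem grow_closed {cells : List (Int × Int)} (hcn : cells.Nodup) :
    ∀ (fuel : Nat) (region : List (Int × Int)), region.Nodup → region ⊆ cells →
      cells.length < region.length + fuel →
      ∀ p ∈ cells, (∃ q ∈ growRegion cells fuel region, nbr p q) →
        p ∈ growRegion cells fuel region := by
  intro fuel
  induction fuel with
  | zero =>
      intro region hn hsub hlen
      exact absurd (nodup_subset_length hn hsub) (by omega)
  | succ n ih =>
      intro region hn hsub hlen p hp hq
      rw [growRegion] at hq ⊢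
      by_cases he : (List.filter (fun p =>
          decide (p ∉ region ∧ ((p.1 + 1, p.2) ∈ region ∨ (p.1 - 1, p.2) ∈ region ∨
            (p.1, p.2 + 1) ∈ region ∨ (p.1, p.2 - 1) ∈ region))) cells).isEmpty
      · rw [if_pos he] at hq ⊢
        obtain ⟨q, hq1, hq2⟩ := hq
        by_contra hpr
        have : p ∈ (List.filter (fun p =>
            decide (p ∉ region ∧ ((p.1 + 1, p.2) ∈ region ∨ (p.1 - 1, p.2) ∈ region ∨
              (p.1, p.2 + 1) ∈ region ∨ (p.1, p.2 - 1) ∈ region))) cells) := by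
          rw [mem_grow_added]
          exact ⟨hp, hpr, q, hq1, hq2⟩
        rw [List.isEmpty_iff] at he
        rw [he] at this
        exact absurd this (List.not_mem_nil)
      · rw [if_neg he] at hq ⊢
        have hne : (List.filter (fun p =>
            decide (p ∉ region ∧ ((p.1 + 1, p.2) ∈ region ∨ (p.1 - 1, p.2) ∈ region ∨
              (p.1, p.2 + 1) ∈ region ∨ (p.1, p.2 - 1) ∈ region))) cells) ≠ [] := by
          intro h; rw [h] at he; simp at he
        have hn' : (region ++ (List.filter (fun p =>
            decide (p ∉ region ∧ ((p.1 + 1, p.2) ∈ region ∨ (p.1 - 1, p.2) ∈ region ∨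
              (p.1, p.2 + 1) ∈ region ∨ (p.1, p.2 - 1) ∈ region))) cells)).Nodup := by
          rw [List.nodup_append]
          refine ⟨hn, hcn.filter _, ?_⟩
          intro x hx y hy hxy
          subst hxy
          rw [mem_grow_added] at hy
          exact hy.2.1 hx
        refine ih _ hn' ?_ ?_ p hp hq
        · intro x hx
          rcases List.mem_append.1 hx with hx | hx
          · exact hsub hx
          · exact (mem_grow_added.1 hx).1
        · have : 0 < (List.filter (fun p =>
              decide (p ∉ region ∧ ((p.1 + 1, p.2) ∈ region ∨ (p.1 - 1, p.2) ∈ region ∨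
                (p.1, p.2 + 1) ∈ region ∨ (p.1, p.2 - 1) ∈ region))) cells).length :=
            List.length_pos_iff.2 hne
          rw [List.length_append]
          omega

def compSet (g : List (List Char)) (N M : Nat) (s : Int × Int) : List (Int × Int) :=
  growRegion (cellsOf g N M (cellAt g s.1 s.2))
    (cellsOf g N M (cellAt g s.1 s.2)).length [s]

theorem mem_compSet {g : List (List Char)} {N M : Nat} {s q : Int × Int} (hs : inb N M s) :
    q ∈ compSet g N M s ↔ Reach g N M s q := by
  constructor
  · intro h
    exact grow_sound hs _ _ (by intro r hr; rw [List.mem_singleton] at hr; subst hr; exact Relation.ReflTransGen.refl) q h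
  · intro h
    have hscell : s ∈ cellsOf g N M (cellAt g s.1 s.2) := mem_cellsOf.2 ⟨hs, rfl⟩
    induction h with
    | refl => exact grow_mono _ _ (List.mem_singleton_self s)
    | tail hb ha ih =>
        rename_i b q'
        have hbc : b ∈ compSet g N M s := ih
        have hq'cell : q' ∈ cellsOf g N M (cellAt g s.1 s.2) := by
          refine mem_cellsOf.2 ⟨ha.2.1, ?_⟩
          rw [ha.2.2.2, reach_color hb]
        refine grow_closed (nodup_cellsOf g N M _) _ [s] (List.nodup_singleton s)
          (by intro x hx; rw [List.mem_singleton] at hx; subst hx; exact hscell)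
          (by simp) q' hq'cell ⟨b, hbc, nbr_symm ha.2.2.1⟩


theorem getD_set' {α : Type} (l : List α) (n m : Nat) (a d : α) :
    (l.set n a).getD m d = if n = m ∧ n < l.length then a else l.getD m d := by
  rw [List.getD_eq_getElem?_getD, List.getElem?_set, List.getD_eq_getElem?_getD]
  by_cases h : n = m
  · subst h
    by_cases h2 : n < l.length
    · simp [h2]
    · simp [h2]
  · rw [if_neg h, if_neg (by tauto)]

def vDims (N M : Nat) (v : List (List Int)) : Prop :=
  v.length = N ∧ ∀ r ∈ v, r.length = M

theorem vDims_replicate (N M : Nat) :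
    vDims N M (List.replicate N (List.replicate M (0 : Int))) := by
  constructor
  · simp
  · intro r hr
    rw [List.eq_of_mem_replicate hr]
    simp

theorem vGet_replicate (N M : Nat) (i j : Int) :
    vGet (List.replicate N (List.replicate M (0 : Int))) i j = 0 := by
  unfold vGet
  by_cases h : i.toNat < N
  · rw [List.getD_replicate _ h]
    by_cases h2 : j.toNat < M
    · rw [List.getD_replicate _ h2]
    · rw [List.getD_eq_default (List.replicate M (0 : Int)) 0 (by simpa using Nat.le_of_not_lt h2)]
  · have houter : (List.replicate N (List.replicate M (0 : Int))).getD i.toNat [] = [] :=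
      List.getD_eq_default _ _ (by simpa using Nat.le_of_not_lt h)
    rw [houter]
    simp

theorem vDims_vSet {N M : Nat} {v : List (List Int)} (hd : vDims N M v) (i j : Int) :
    vDims N M (vSet v i j) := by
  obtain ⟨h1, h2⟩ := hd
  constructor
  · rw [vSet, List.length_set, h1]
  · intro r hr
    by_cases h : i.toNat < v.length
    · rcases List.mem_or_eq_of_mem_set hr with hr2 | rfl
      · exact h2 r hr2
      · rw [List.length_set]
        refine h2 _ ?_
        rw [List.getD_eq_getElem _ _ h]
        exact List.getElem_mem h
    · rw [vSet, List.set_eq_of_length_le (Nat.le_of_not_lt h)] at hr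
      exact h2 r hr

theorem vGet_vSet {N M : Nat} {v : List (List Int)} (hd : vDims N M v)
    {i j i' j' : Int} (hp : inb N M (i, j)) (hq : inb N M (i', j')) :
    vGet (vSet v i j) i' j' = if i' = i ∧ j' = j then 1 else vGet v i' j' := by
  obtain ⟨hd1, hd2⟩ := hd
  obtain ⟨p1, p2, p3, p4⟩ := hp
  obtain ⟨q1, q2, q3, q4⟩ := hq
  simp only at p1 p2 p3 p4 q1 q2 q3 q4
  unfold vGet vSet
  rw [getD_set']
  by_cases hi : i.toNat = i'.toNat
  · have hii : i' = i := by omega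
    have hlen : i.toNat < v.length := by omega
    rw [if_pos ⟨hi, hlen⟩]
    rw [getD_set']
    have hrowlen : (v.getD i.toNat []).length = M := by
      refine hd2 _ ?_
      rw [List.getD_eq_getElem _ _ hlen]
      exact List.getElem_mem hlen
    by_cases hj : j.toNat = j'.toNat
    · have hjj : j' = j := by omega
      rw [if_pos ⟨hj, by omega⟩, if_pos ⟨hii, hjj⟩]
    · have hjj : ¬(j' = j) := by omega
      rw [if_neg (by tauto), if_neg (by tauto)]
      rw [hii]
  · have hii : ¬(i' = i) := by omega
    rw [if_neg (by tauto), if_neg (by tauto)]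

def unvis (N M : Nat) (v : List (List Int)) : Nat :=
  ((cellList N M).filter (fun p => vGet v p.1 p.2 == 0)).length

theorem unvis_le (N M : Nat) (v : List (List Int)) : unvis N M v ≤ N * M := by
  rw [unvis, ← length_cellList N M]
  exact List.length_filter_le _ _

theorem filter_flip {l : List (Int × Int)} (hl : l.Nodup) {f f' : (Int × Int) → Bool}
    {p : Int × Int} (hp : p ∈ l) (hfp : f p = true) (hfp' : f' p = false)
    (hag : ∀ q ∈ l, q ≠ p → f' q = f q) :
    (l.filter f').length + 1 = (l.filter f).length := by
  induction l with
  | nil => cases hp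
  | cons a l ih =>
      by_cases hpa : p = a
      · subst hpa
        have hnotin : p ∉ l := (List.nodup_cons.1 hl).1
        have hfeq : l.filter f' = l.filter f := by
          apply List.filter_congr
          intro q hq
          exact hag q (List.mem_cons_of_mem p hq) (fun h => hnotin (h ▸ hq))
        rw [List.filter_cons, List.filter_cons, hfeq]
        rw [if_pos hfp, if_neg (by simp [hfp'])]
        simp
      · have hpl : p ∈ l := (List.mem_cons.1 hp).resolve_left hpa
        have hfa : f' a = f a := hag a List.mem_cons_self (fun h => hpa (h.symm))
        have ihr := ih (List.nodup_cons.1 hl).2 hpl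
          (fun q hq hqp => hag q (List.mem_cons_of_mem a hq) hqp)
        rw [List.filter_cons, List.filter_cons, hfa]
        by_cases h : f a = true
        · rw [if_pos h, if_pos h]
          simp only [List.length_cons]
          omega
        · rw [if_neg h, if_neg h]
          exact ihr

theorem unvis_vSet {N M : Nat} {v : List (List Int)} (hd : vDims N M v)
    {p : Int × Int} (hp : inb N M p) (h0 : vGet v p.1 p.2 = 0) :
    unvis N M (vSet v p.1 p.2) + 1 = unvis N M v := by
  unfold unvis
  refine filter_flip (nodup_cellList N M) (mem_cellList.2 hp) (by simp [h0]) ?_ ?_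
  · have := vGet_vSet hd (i := p.1) (j := p.2) (i' := p.1) (j' := p.2) hp hp
    rw [if_pos ⟨rfl, rfl⟩] at this
    simp [this]
  · intro q hq hqp
    have hqi := mem_cellList.1 hq
    have := vGet_vSet hd (i := p.1) (j := p.2) (i' := q.1) (j' := q.2) hp (by
      obtain ⟨a, b⟩ := q; exact hqi)
    rw [if_neg (by
      intro hcontra
      apply hqp
      obtain ⟨a, b⟩ := q
      obtain ⟨a', b'⟩ := p
      simp only at hcontra
      simp [hcontra.1, hcontra.2])] at this
    simp [this]


theorem vGet_vSet' {N M : Nat} {v : List (List Int)} (hd : vDims N M v)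
    {p q : Int × Int} (hp : inb N M p) (hq : inb N M q) :
    vGet (vSet v p.1 p.2) q.1 q.2 = if q = p then 1 else vGet v q.1 q.2 := by
  obtain ⟨a, b⟩ := p
  obtain ⟨c, d⟩ := q
  rw [vGet_vSet hd hp hq]
  by_cases h : c = a ∧ d = b
  · rw [if_pos h, if_pos (by simp [Prod.ext_iff]; tauto)]
  · rw [if_neg h, if_neg (by simp [Prod.ext_iff]; tauto)]

def nbrListA (c : Int × Int) : List (Int × Int) :=
  [(c.1 + 1, c.2 + 0), (c.1 + -1, c.2 + 0), (c.1 + 0, c.2 + 1), (c.1 + 0, c.2 + -1)]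

theorem mem_nbrListA {c q : Int × Int} : q ∈ nbrListA c ↔ nbr c q := by
  obtain ⟨a, b⟩ := c
  obtain ⟨x, y⟩ := q
  simp only [nbrListA, nbr, List.mem_cons, List.not_mem_nil, or_false, Prod.mk.injEq]
  constructor <;> rintro (h | h | h | h) <;> omega

def step1 (g : List (List Char)) (N M : Nat) (target : Char)
    (st : List (Int × Int) × List (List Int)) (n : Int × Int) :
    List (Int × Int) × List (List Int) :=
  if 0 ≤ n.1 ∧ n.1 < (N : Int) ∧ 0 ≤ n.2 ∧ n.2 < (M : Int) then
    if vGet st.2 n.1 n.2 = 0 then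
      if cellAt g n.1 n.2 = target then (st.1 ++ [n], vSet st.2 n.1 n.2) else st
    else st
  else st

theorem bfsStep_eq (g : List (List Char)) (N M : Nat) (target : Char)
    (st : List (Int × Int) × List (List Int)) (c : Int × Int) :
    bfsStep g N M target st c = (nbrListA c).foldl (step1 g N M target) st := rfl

def FoldOut (g : List (List Char)) (N M : Nat) (target : Char)
    (v : List (List Int)) (Q ns : List (Int × Int))
    (st' : List (Int × Int) × List (List Int)) : Prop :=
  ∃ ex : List (Int × Int),
    st'.1 = Q ++ ex ∧
    vDims N M st'.2 ∧
    (∀ p, inb N M p → vGet st'.2 p.1 p.2 = 0 ∨ vGet st'.2 p.1 p.2 = 1) ∧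
    (∀ p, inb N M p → (vGet st'.2 p.1 p.2 = 1 ↔ vGet v p.1 p.2 = 1 ∨ p ∈ ex)) ∧
    (∀ p ∈ ex, p ∈ ns ∧ inb N M p ∧ cellAt g p.1 p.2 = target) ∧
    (∀ q ∈ ns, inb N M q → cellAt g q.1 q.2 = target → vGet st'.2 q.1 q.2 = 1) ∧
    unvis N M v = unvis N M st'.2 + ex.length

theorem fold_step1 {g : List (List Char)} {N M : Nat} {target : Char} :
    ∀ (ns : List (Int × Int)) (Q : List (Int × Int)) (v : List (List Int)),
      vDims N M v →
      (∀ p, inb N M p → vGet v p.1 p.2 = 0 ∨ vGet v p.1 p.2 = 1) →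
      FoldOut g N M target v Q ns (ns.foldl (step1 g N M target) (Q, v)) := by
  intro ns
  induction ns with
  | nil =>
      intro Q v hd hbin
      refine ⟨[], by simp, hd, hbin, ?_, by simp, by simp, by simp⟩
      intro p _
      simp
  | cons n ns ih =>
      intro Q v hd hbin
      rw [List.foldl_cons]
      by_cases hg : 0 ≤ n.1 ∧ n.1 < (N : Int) ∧ 0 ≤ n.2 ∧ n.2 < (M : Int)
      · have hninb : inb N M n := hg
        by_cases hv : vGet v n.1 n.2 = 0
        · by_cases hcol : cellAt g n.1 n.2 = target
          · have hstep : step1 g N M target (Q, v) n = (Q ++ [n], vSet v n.1 n.2) := by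
              rw [step1, if_pos hg]
              simp only
              rw [if_pos hv, if_pos hcol]
            rw [hstep]
            have hd' : vDims N M (vSet v n.1 n.2) := vDims_vSet hd n.1 n.2
            have hbin' : ∀ p, inb N M p →
                vGet (vSet v n.1 n.2) p.1 p.2 = 0 ∨ vGet (vSet v n.1 n.2) p.1 p.2 = 1 := by
              intro p hp
              rw [vGet_vSet' hd hninb hp]
              split
              · exact Or.inr rfl
              · exact hbin p hp
            obtain ⟨ex, he1, he2, he3, he4, he5, he6, he7⟩ := ih (Q ++ [n]) (vSet v n.1 n.2) hd' hbin'
            refine ⟨n :: ex, ?_, he2, he3, ?_, ?_, ?_, ?_⟩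
            · rw [he1]; simp
            · intro p hp
              rw [he4 p hp, vGet_vSet' hd hninb hp]
              by_cases hpn : p = n
              · subst hpn; simp
              · rw [if_neg hpn]
                simp [hpn]
            · intro p hp
              rcases List.mem_cons.1 hp with rfl | hp2
              · exact ⟨List.mem_cons_self, hninb, hcol⟩
              · obtain ⟨m1, m2, m3⟩ := he5 p hp2
                exact ⟨List.mem_cons_of_mem n m1, m2, m3⟩
            · intro q hq hqi hqc
              rcases List.mem_cons.1 hq with rfl | hq2
              · rw [he4 q hqi, vGet_vSet' hd hninb hqi]
                simp
              · exact he6 q hq2 hqi hqc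
            · have hstepu : unvis N M (vSet v n.1 n.2) + 1 = unvis N M v :=
                unvis_vSet hd hninb hv
              rw [List.length_cons]
              omega
          · have hstep : step1 g N M target (Q, v) n = (Q, v) := by
              rw [step1, if_pos hg]
              simp only
              rw [if_pos hv, if_neg hcol]
            rw [hstep]
            obtain ⟨ex, he1, he2, he3, he4, he5, he6, he7⟩ := ih Q v hd hbin
            refine ⟨ex, he1, he2, he3, he4, ?_, ?_, he7⟩
            · intro p hp
              obtain ⟨m1, m2, m3⟩ := he5 p hp
              exact ⟨List.mem_cons_of_mem n m1, m2, m3⟩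
            · intro q hq hqi hqc
              rcases List.mem_cons.1 hq with rfl | hq2
              · exact absurd hqc hcol
              · exact he6 q hq2 hqi hqc
        · have hv1 : vGet v n.1 n.2 = 1 := (hbin n hninb).resolve_left hv
          have hstep : step1 g N M target (Q, v) n = (Q, v) := by
            rw [step1, if_pos hg]
            simp only
            rw [if_neg hv]
          rw [hstep]
          obtain ⟨ex, he1, he2, he3, he4, he5, he6, he7⟩ := ih Q v hd hbin
          refine ⟨ex, he1, he2, he3, he4, ?_, ?_, he7⟩
          · intro p hp
            obtain ⟨m1, m2, m3⟩ := he5 p hp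
            exact ⟨List.mem_cons_of_mem n m1, m2, m3⟩
          · intro q hq hqi hqc
            rcases List.mem_cons.1 hq with rfl | hq2
            · rw [he4 q hqi]
              exact Or.inl hv1
            · exact he6 q hq2 hqi hqc
      · have hstep : step1 g N M target (Q, v) n = (Q, v) := by
          rw [step1, if_neg hg]
        rw [hstep]
        obtain ⟨ex, he1, he2, he3, he4, he5, he6, he7⟩ := ih Q v hd hbin
        refine ⟨ex, he1, he2, he3, he4, ?_, ?_, he7⟩
        · intro p hp
          obtain ⟨m1, m2, m3⟩ := he5 p hp
          exact ⟨List.mem_cons_of_mem n m1, m2, m3⟩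
        · intro q hq hqi hqc
          rcases List.mem_cons.1 hq with rfl | hq2
          · exact absurd hqi hg
          · exact he6 q hq2 hqi hqc

def BfsInv (g : List (List Char)) (N M : Nat) (s : Int × Int)
    (v0 : List (List Int)) (Q : List (Int × Int)) (v : List (List Int)) : Prop :=
  vDims N M v ∧
  (∀ p, inb N M p → vGet v p.1 p.2 = 0 ∨ vGet v p.1 p.2 = 1) ∧
  (∀ p ∈ Q, Reach g N M s p ∧ inb N M p ∧ vGet v p.1 p.2 = 1) ∧
  (∀ p, inb N M p → vGet v p.1 p.2 = 1 → vGet v0 p.1 p.2 = 1 ∨ Reach g N M s p) ∧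
  (∀ p, inb N M p → vGet v0 p.1 p.2 = 1 → vGet v p.1 p.2 = 1) ∧
  (∀ p, inb N M p → vGet v p.1 p.2 = 1 → Reach g N M s p → p ∉ Q →
    ∀ q, adjR g N M p q → vGet v q.1 q.2 = 1)

theorem bfsLoop_inv {g : List (List Char)} {N M : Nat} {s : Int × Int}
    {v0 : List (List Int)} (_hs : inb N M s) :
    ∀ (fuel : Nat) (Q : List (Int × Int)) (v : List (List Int)),
      BfsInv g N M s v0 Q v →
      5 * unvis N M v + Q.length ≤ fuel →
      BfsInv g N M s v0 [] (bfsLoop g N M (cellAt g s.1 s.2) fuel Q v) := by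
  intro fuel
  induction fuel with
  | zero =>
      intro Q v hinv hfuel
      match Q with
      | [] => exact hinv
      | c :: rest => simp at hfuel
  | succ f ih =>
      intro Q v hinv hfuel
      match Q with
      | [] => exact hinv
      | c :: rest =>
        obtain ⟨hd, hbin, hqr, hsub, hmono, hfront⟩ := hinv
        obtain ⟨hcr, hci, hcv⟩ := hqr c List.mem_cons_self
        have hccol : cellAt g c.1 c.2 = cellAt g s.1 s.2 := reach_color hcr
        rw [bfsLoop]
        rw [bfsStep_eq]
        obtain ⟨ex, he1, he2, he3, he4, he5, he6, he7⟩ :=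
          fold_step1 (g := g) (N := N) (M := M) (target := cellAt g s.1 s.2)
            (nbrListA c) rest v hd hbin
        set st := (nbrListA c).foldl (step1 g N M (cellAt g s.1 s.2)) (rest, v) with hst
        have hexre : ∀ p ∈ ex, Reach g N M s p ∧ inb N M p ∧ vGet st.2 p.1 p.2 = 1 := by
          intro p hp
          obtain ⟨m1, m2, m3⟩ := he5 p hp
          have hnbr : nbr c p := mem_nbrListA.1 m1
          have hadj : adjR g N M c p := ⟨hci, m2, hnbr, by rw [m3, hccol]⟩
          refine ⟨Relation.ReflTransGen.tail hcr hadj, m2, ?_⟩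
          rw [he4 p m2]
          exact Or.inr hp
        refine ih st.1 st.2 ⟨he2, he3, ?_, ?_, ?_, ?_⟩ ?_
        · intro p hp
          rw [he1] at hp
          rcases List.mem_append.1 hp with hp2 | hp2
          · obtain ⟨r1, r2, r3⟩ := hqr p (List.mem_cons_of_mem c hp2)
            refine ⟨r1, r2, ?_⟩
            rw [he4 p r2]
            exact Or.inl r3
          · exact hexre p hp2
        · intro p hp hv1
          rw [he4 p hp] at hv1
          rcases hv1 with hv1 | hv1
          · exact hsub p hp hv1
          · exact Or.inr (hexre p hv1).1
        · intro p hp hv0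
          rw [he4 p hp]
          exact Or.inl (hmono p hp hv0)
        · intro p hp hv1 hre hnq q hadj
          rw [he4 p hp] at hv1
          have hqinb : inb N M q := hadj.2.1
          rcases hv1 with hv1 | hv1
          · by_cases hpc : p = c
            · subst hpc
              refine he6 q (mem_nbrListA.2 hadj.2.2.1) hqinb ?_
              rw [hadj.2.2.2, hccol]
            · have hpq : p ∉ (c :: rest) := by
                intro hmem
                rcases List.mem_cons.1 hmem with rfl | hmem2
                · exact hpc rfl
                · exact hnq (by rw [he1]; exact List.mem_append.2 (Or.inl hmem2))
              have := hfront p hp hv1 hre hpq q hadj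
              rw [he4 q hqinb]
              exact Or.inl this
          · exact absurd (by rw [he1]; exact List.mem_append.2 (Or.inr hv1)) hnq
        · have hlen : st.1.length = rest.length + ex.length := by
            rw [he1, List.length_append]
          simp only [List.length_cons] at hfuel
          omega

theorem bfs_spec {g : List (List Char)} {N M : Nat} {s : Int × Int}
    {v : List (List Int)} (hd : vDims N M v)
    (hbin : ∀ p, inb N M p → vGet v p.1 p.2 = 0 ∨ vGet v p.1 p.2 = 1)
    (hs : inb N M s) (hvs : vGet v s.1 s.2 = 1)
    (hblock : ∀ p, inb N M p → Reach g N M s p → vGet v p.1 p.2 = 1 → p = s) :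
    vDims N M (bfsLoop g N M (cellAt g s.1 s.2) (5 * N * M + 1) [s] v) ∧
    (∀ p, inb N M p → vGet (bfsLoop g N M (cellAt g s.1 s.2) (5 * N * M + 1) [s] v) p.1 p.2 = 0 ∨
          vGet (bfsLoop g N M (cellAt g s.1 s.2) (5 * N * M + 1) [s] v) p.1 p.2 = 1) ∧
    (∀ q, inb N M q →
      (vGet (bfsLoop g N M (cellAt g s.1 s.2) (5 * N * M + 1) [s] v) q.1 q.2 = 1 ↔
        vGet v q.1 q.2 = 1 ∨ Reach g N M s q)) := by
  have hinv : BfsInv g N M s v [s] v := by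
    refine ⟨hd, hbin, ?_, ?_, ?_, ?_⟩
    · intro p hp
      rw [List.mem_singleton] at hp
      subst hp
      exact ⟨Relation.ReflTransGen.refl, hs, hvs⟩
    · intro p hp hv1
      exact Or.inl hv1
    · intro p hp hv0
      exact hv0
    · intro p hp hv1 hre hnq q hadj
      exact absurd (by rw [List.mem_singleton]; exact hblock p hp hre hv1) hnq
  have hfuel : 5 * unvis N M v + ([s] : List (Int × Int)).length ≤ 5 * N * M + 1 := by
    have h5 : 5 * unvis N M v ≤ 5 * (N * M) := Nat.mul_le_mul_left _ (unvis_le N M v)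
    have h6 : 5 * (N * M) = 5 * N * M := (Nat.mul_assoc 5 N M).symm
    simp only [List.length_singleton]
    rw [← h6]
    omega
  obtain ⟨hd', hbin', hqr', hsub', hmono', hfront'⟩ := bfsLoop_inv hs (5 * N * M + 1) [s] v hinv hfuel
  refine ⟨hd', hbin', ?_⟩
  intro q hq
  constructor
  · intro h1
    rcases hsub' q hq h1 with h2 | h2
    · exact Or.inl h2
    · exact Or.inr h2
  · intro h1
    have hclose : ∀ q', Reach g N M s q' →
        vGet (bfsLoop g N M (cellAt g s.1 s.2) (5 * N * M + 1) [s] v) q'.1 q'.2 = 1 := by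
      intro q' h2
      induction h2 with
      | refl => exact hmono' s hs hvs
      | tail hb ha ihh =>
          exact hfront' _ (reach_inb hb hs) ihh hb List.not_mem_nil _ ha
    rcases h1 with h1 | h1
    · exact hmono' q hq h1
    · exact hclose q h1


def leaderB (g : List (List Char)) (N M : Nat) (p : Int × Int) : Bool :=
  ((cellList N M).find? (fun q => decide (p ∈ compSet g N M q))) == some p

def numLead (g : List (List Char)) (N M : Nat) (k : Char) : Nat :=
  ((cellList N M).filter (fun p => leaderB g N M p && (cellAt g p.1 p.2 == k))).length

def OuterInv (g : List (List Char)) (N M : Nat) (nk0 : PySem.Dict Char Int)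
    (P : List (Int × Int)) (st : List (List Int) × PySem.Dict Char Int) : Prop :=
  vDims N M st.1 ∧
  (∀ p, inb N M p → vGet st.1 p.1 p.2 = 0 ∨ vGet st.1 p.1 p.2 = 1) ∧
  (∀ q, inb N M q → (vGet st.1 q.1 q.2 = 1 ↔ ∃ p ∈ P, Reach g N M p q)) ∧
  (∀ k, PySem.Dict.getD st.2 k 0 = PySem.Dict.getD nk0 k 0 +
    ((P.filter (fun p => leaderB g N M p && (cellAt g p.1 p.2 == k))).length : Int))

theorem leaderB_false {g : List (List Char)} {N M : Nat} {P rest : List (Int × Int)}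
    {p q0 : Int × Int} (hdec : cellList N M = P ++ p :: rest)
    (hq0 : q0 ∈ P) (hre : Reach g N M q0 p) : leaderB g N M p = false := by
  have hnd := nodup_cellList N M
  rw [hdec] at hnd
  have hpP : p ∉ P := by
    intro hmem
    have := (List.nodup_append.1 hnd).2.2 p hmem p List.mem_cons_self
    exact this rfl
  have hq0inb : inb N M q0 := mem_cellList.1 (by rw [hdec]; exact List.mem_append.2 (Or.inl hq0))
  have hq0sat : (fun q => decide (p ∈ compSet g N M q)) q0 = true := by
    simp only [decide_eq_true_iff]
    exact (mem_compSet hq0inb).2 hre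
  rw [leaderB, hdec, List.find?_append]
  have : (List.find? (fun q => decide (p ∈ compSet g N M q)) P).isSome := by
    rw [List.find?_isSome]
    exact ⟨q0, hq0, hq0sat⟩
  obtain ⟨r, hr⟩ := Option.isSome_iff_exists.1 this
  rw [hr]
  have hrP : r ∈ P := List.mem_of_find?_eq_some hr
  have : r ≠ p := fun h => hpP (h ▸ hrP)
  simp [Option.or, this]

theorem leaderB_true {g : List (List Char)} {N M : Nat} {P rest : List (Int × Int)}
    {p : Int × Int} (hdec : cellList N M = P ++ p :: rest)
    (hnone : ∀ q0 ∈ P, ¬ Reach g N M q0 p) : leaderB g N M p = true := by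
  have hpinb : inb N M p := mem_cellList.1 (by rw [hdec]; exact List.mem_append.2 (Or.inr List.mem_cons_self))
  rw [leaderB, hdec, List.find?_append]
  have hP : List.find? (fun q => decide (p ∈ compSet g N M q)) P = none := by
    rw [List.find?_eq_none]
    intro q0 hq0
    simp only [decide_eq_true_iff]
    intro hmem
    have hq0inb : inb N M q0 := mem_cellList.1 (by rw [hdec]; exact List.mem_append.2 (Or.inl hq0))
    exact hnone q0 hq0 ((mem_compSet hq0inb).1 hmem)
  rw [hP]
  have hp : List.find? (fun q => decide (p ∈ compSet g N M q)) (p :: rest) = some p := by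
    rw [List.find?_cons_of_pos]
    simp only [decide_eq_true_iff]
    exact (mem_compSet hpinb).2 Relation.ReflTransGen.refl
  rw [Option.none_or, hp]
  simp

theorem outer_fold {g : List (List Char)} {N M : Nat} {nk0 : PySem.Dict Char Int} :
    ∀ (suffix P : List (Int × Int)) (st : List (List Int) × PySem.Dict Char Int),
      OuterInv g N M nk0 P st → cellList N M = P ++ suffix →
      OuterInv g N M nk0 (P ++ suffix) (suffix.foldl (floodStep g N M) st) := by
  intro suffix
  induction suffix with
  | nil => intro P st hinv hdec; simpa using hinv
  | cons p rest ih =>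
      intro P st hinv hdec
      obtain ⟨hd, hbin, hvis, hcnt⟩ := hinv
      have hpinb : inb N M p := mem_cellList.1 (by rw [hdec]; exact List.mem_append.2 (Or.inr List.mem_cons_self))
      rw [List.foldl_cons]
      have hgoal : ∀ st', OuterInv g N M nk0 (P ++ [p]) st' →
          OuterInv g N M nk0 (P ++ p :: rest) (rest.foldl (floodStep g N M) st') := by
        intro st' hinv'
        have hdec' : cellList N M = (P ++ [p]) ++ rest := by
          rw [hdec]; simp
        have := ih (P ++ [p]) st' hinv' hdec'
        rwa [List.append_assoc, List.singleton_append] at this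
      apply hgoal
      by_cases hv : vGet st.1 p.1 p.2 = 0
      · have hnoP : ∀ q0 ∈ P, ¬ Reach g N M q0 p := by
          intro q0 hq0 hre
          have := (hvis p hpinb).2 ⟨q0, hq0, hre⟩
          omega
        have hlead : leaderB g N M p = true := leaderB_true hdec hnoP
        have hstep : floodStep g N M st p =
            (bfsLoop g N M (cellAt g p.1 p.2) (5 * N * M + 1) [p] (vSet st.1 p.1 p.2),
             PySem.Dict.modify st.2 (cellAt g p.1 p.2) 0 (· + 1)) := by
          rw [floodStep, if_pos hv]
        rw [hstep]
        have hd1 : vDims N M (vSet st.1 p.1 p.2) := vDims_vSet hd p.1 p.2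
        have hbin1 : ∀ q, inb N M q → vGet (vSet st.1 p.1 p.2) q.1 q.2 = 0 ∨
            vGet (vSet st.1 p.1 p.2) q.1 q.2 = 1 := by
          intro q hq
          rw [vGet_vSet' hd hpinb hq]
          split
          · exact Or.inr rfl
          · exact hbin q hq
        have hv1p : vGet (vSet st.1 p.1 p.2) p.1 p.2 = 1 := by
          rw [vGet_vSet' hd hpinb hpinb, if_pos rfl]
        have hblock : ∀ r, inb N M r → Reach g N M p r →
            vGet (vSet st.1 p.1 p.2) r.1 r.2 = 1 → r = p := by
          intro r hr hre hv1
          by_contra hne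
          rw [vGet_vSet' hd hpinb hr, if_neg hne] at hv1
          obtain ⟨q0, hq0, hq0r⟩ := (hvis r hr).1 hv1
          exact hnoP q0 hq0 (reach_trans hq0r (reach_symm hre))
        obtain ⟨hd2, hbin2, hiff2⟩ := bfs_spec hd1 hbin1 hpinb hv1p hblock
        refine ⟨hd2, hbin2, ?_, ?_⟩
        · intro q hq
          rw [hiff2 q hq, vGet_vSet' hd hpinb hq]
          constructor
          · rintro (h1 | h1)
            · by_cases hqp : q = p
              · exact ⟨p, List.mem_append.2 (Or.inr (List.mem_singleton_self p)), hqp ▸ Relation.ReflTransGen.refl⟩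
              · rw [if_neg hqp] at h1
                obtain ⟨q0, hq0, hq0r⟩ := (hvis q hq).1 h1
                exact ⟨q0, List.mem_append.2 (Or.inl hq0), hq0r⟩
            · exact ⟨p, List.mem_append.2 (Or.inr (List.mem_singleton_self p)), h1⟩
          · rintro ⟨q0, hq0, hq0r⟩
            rcases List.mem_append.1 hq0 with hq0P | hq0p
            · left
              split
              · rfl
              · exact (hvis q hq).2 ⟨q0, hq0P, hq0r⟩
            · right
              rw [List.mem_singleton] at hq0p
              subst hq0p
              exact hq0r
        · intro k
          rw [PySem.Dict.getD_modify, hcnt k, List.filter_append]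
          by_cases hk : k = cellAt g p.1 p.2
          · rw [if_pos hk]
            subst hk
            have : List.filter (fun q => leaderB g N M q && (cellAt g q.1 q.2 == cellAt g p.1 p.2)) [p] = [p] := by
              simp [hlead]
            rw [this]
            simp only [List.length_append, List.length_singleton]
            rw [hcnt (cellAt g p.1 p.2)]
            push_cast
            ring
          · rw [if_neg hk]
            have : List.filter (fun q => leaderB g N M q && (cellAt g q.1 q.2 == k)) [p] = [] := by
              simp only [List.filter_cons, List.filter_nil]
              rw [if_neg]
              simp only [Bool.and_eq_true, beq_iff_eq]
              intro hcontra
              exact hk hcontra.2.symm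
            rw [this]
            simp
      · have hv1 : vGet st.1 p.1 p.2 = 1 := (hbin p hpinb).resolve_left hv
        obtain ⟨q0, hq0, hq0r⟩ := (hvis p hpinb).1 hv1
        have hlead : leaderB g N M p = false := leaderB_false hdec hq0 hq0r
        have hstep : floodStep g N M st p = st := by
          rw [floodStep, if_neg hv]
        rw [hstep]
        refine ⟨hd, hbin, ?_, ?_⟩
        · intro q hq
          rw [hvis q hq]
          constructor
          · rintro ⟨r, hr, hrr⟩
            exact ⟨r, List.mem_append.2 (Or.inl hr), hrr⟩
          · rintro ⟨r, hr, hrr⟩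
            rcases List.mem_append.1 hr with hr2 | hr2
            · exact ⟨r, hr2, hrr⟩
            · rw [List.mem_singleton] at hr2
              subst hr2
              exact ⟨q0, hq0, reach_trans hq0r hrr⟩
        · intro k
          rw [hcnt k, List.filter_append]
          have : List.filter (fun q => leaderB g N M q && (cellAt g q.1 q.2 == k)) [p] = [] := by
            simp [hlead]
          rw [this]
          simp

theorem nk0_getD (keys : List Char) (k : Char) :
    PySem.Dict.getD (keys.foldl (fun d k => PySem.Dict.insert d k 0) PySem.Dict.empty) k 0
      = (0 : Int) := by
  suffices h : ∀ (d : PySem.Dict Char Int), PySem.Dict.getD d k 0 = 0 →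
      PySem.Dict.getD (keys.foldl (fun d k => PySem.Dict.insert d k 0) d) k 0 = 0 by
    exact h PySem.Dict.empty (by simp [pysem])
  induction keys with
  | nil => intro d hd; exact hd
  | cons c cs ih =>
      intro d hd
      rw [List.foldl_cons]
      refine ih _ ?_
      rw [PySem.Dict.getD_insert]
      split
      · rfl
      · exact hd

theorem checkA_iff (g : List (List Char)) (N M : Nat) (keys : List Char) :
    checkA g N M keys = true ↔ ∀ k ∈ keys, numLead g N M k = 1 := by
  have hinit : OuterInv g N M
      (keys.foldl (fun d k => PySem.Dict.insert d k 0) PySem.Dict.empty) []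
      (List.replicate N (List.replicate M (0 : Int)),
       keys.foldl (fun d k => PySem.Dict.insert d k 0) PySem.Dict.empty) := by
    refine ⟨vDims_replicate N M, ?_, ?_, ?_⟩
    · intro p _
      exact Or.inl (vGet_replicate N M p.1 p.2)
    · intro q _
      rw [vGet_replicate N M q.1 q.2]
      simp
    · intro k
      simp
  have hfold := outer_fold (cellList N M) [] _ hinit (by simp)
  rw [List.nil_append] at hfold
  obtain ⟨_, _, _, hcnt⟩ := hfold
  rw [checkA]
  simp only [List.all_eq_true]
  constructor
  · intro h k hk
    have h2 := h k hk
    rw [beq_iff_eq] at h2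
    rw [hcnt k, nk0_getD] at h2
    have : ((numLead g N M k : Int)) = 1 := by
      rw [numLead]
      omega
    exact_mod_cast this
  · intro h k hk
    rw [beq_iff_eq, hcnt k, nk0_getD]
    have := h k hk
    rw [numLead] at this
    rw [this]
    ring


theorem find?_mutual {α : Type} {l : List α} {p p' : α → Bool} {x x' : α}
    (h : l.find? p = some x) (h' : l.find? p' = some x')
    (hx' : p x' = true) (hx : p' x = true) : x = x' := by
  induction l with
  | nil => cases h
  | cons a t ih =>
      by_cases hpa : p a = true
      · rw [List.find?_cons_of_pos hpa] at h
        have hxa : x = a := (Option.some.inj h).symm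
        by_cases hpa' : p' a = true
        · rw [List.find?_cons_of_pos hpa'] at h'
          have hxa' : x' = a := (Option.some.inj h').symm
          rw [hxa, hxa']
        · rw [hxa] at hx
          exact absurd hx hpa'
      · rw [List.find?_cons_of_neg (by simpa using hpa)] at h
        by_cases hpa' : p' a = true
        · rw [List.find?_cons_of_pos hpa'] at h'
          injection h' with h'
          subst h'
          exact absurd hx' hpa
        · rw [List.find?_cons_of_neg (by simpa using hpa')] at h'
          exact ih h h'

theorem leaderB_eq_find {g : List (List Char)} {N M : Nat} {p : Int × Int} :
    leaderB g N M p = true ↔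
      (cellList N M).find? (fun q => decide (p ∈ compSet g N M q)) = some p := by
  rw [leaderB, beq_iff_eq]

theorem head_cellsOf_leader {g : List (List Char)} {N M : Nat} {k : Char}
    {c0 : Int × Int} {tl : List (Int × Int)} (hc : cellsOf g N M k = c0 :: tl) :
    leaderB g N M c0 = true ∧ cellAt g c0.1 c0.2 = k ∧ inb N M c0 := by
  have hc0 : c0 ∈ cellsOf g N M k := by rw [hc]; exact List.mem_cons_self
  obtain ⟨hc0i, hc0c⟩ := mem_cellsOf.1 hc0
  have hfind : (cellList N M).find? (fun p => cellAt g p.1 p.2 == k) = some c0 := by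
    rw [← List.head?_filter]
    rw [cellsOf] at hc
    rw [hc]
    rfl
  obtain ⟨_, as, bs, hdec, has⟩ := List.find?_eq_some_iff_append.1 hfind
  refine ⟨leaderB_true hdec ?_, hc0c, hc0i⟩
  intro q0 hq0 hre
  have hcol : cellAt g q0.1 q0.2 = k := by rw [← hc0c, ← reach_color hre]
  have hneg := has q0 hq0
  simp only [Bool.not_eq_eq_eq_not, Bool.not_true, beq_eq_false_iff_ne, ne_eq] at hneg
  exact hneg hcol

theorem exists_leader_reaching {g : List (List Char)} {N M : Nat} {q : Int × Int}
    (hq : inb N M q) :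
    ∃ l, leaderB g N M l = true ∧ cellAt g l.1 l.2 = cellAt g q.1 q.2 ∧ Reach g N M l q := by
  have hqsat : (fun r => decide (q ∈ compSet g N M r)) q = true := by
    simp only [decide_eq_true_iff]
    exact (mem_compSet hq).2 Relation.ReflTransGen.refl
  have hsome : ((cellList N M).find? (fun r => decide (q ∈ compSet g N M r))).isSome := by
    rw [List.find?_isSome]
    exact ⟨q, mem_cellList.2 hq, hqsat⟩
  obtain ⟨l, hl⟩ := Option.isSome_iff_exists.1 hsome
  have hlmem : l ∈ cellList N M := List.mem_of_find?_eq_some hl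
  have hlinb : inb N M l := mem_cellList.1 hlmem
  have hlsat : q ∈ compSet g N M l := by
    have := List.find?_some hl
    simpa using this
  have hre : Reach g N M l q := (mem_compSet hlinb).1 hlsat
  obtain ⟨_, as, bs, hdec, has⟩ := List.find?_eq_some_iff_append.1 hl
  refine ⟨l, leaderB_true hdec ?_, (reach_color hre).symm, hre⟩
  intro q0 hq0 hre0
  have hq0i : inb N M q0 := mem_cellList.1 (by rw [hdec]; exact List.mem_append.2 (Or.inl hq0))
  have := has q0 hq0
  simp only [Bool.not_eq_eq_eq_not, Bool.not_true, decide_eq_false_iff_not] at this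
  exact this ((mem_compSet hq0i).2 (reach_trans hre0 hre))

theorem leader_unique {g : List (List Char)} {N M : Nat} {l l' : Int × Int}
    (hl : leaderB g N M l = true) (hl' : leaderB g N M l' = true)
    (hre : Reach g N M l l') (hli : inb N M l) (hli' : inb N M l') : l = l' := by
  refine find?_mutual (leaderB_eq_find.1 hl) (leaderB_eq_find.1 hl') ?_ ?_
  · simp only [decide_eq_true_iff]
    exact (mem_compSet hli').2 (reach_symm hre)
  · simp only [decide_eq_true_iff]
    exact (mem_compSet hli).2 hre

theorem numLead_bridge {g : List (List Char)} {N M : Nat} {k : Char} :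
    numLead g N M k = 1 ↔
      ∃ c0 tl, cellsOf g N M k = c0 :: tl ∧ ∀ q ∈ cellsOf g N M k, Reach g N M c0 q := by
  constructor
  · intro h1
    obtain ⟨l, hLk⟩ := List.length_eq_one_iff.1 h1
    have hlmem : l ∈ (cellList N M).filter
        (fun p => leaderB g N M p && (cellAt g p.1 p.2 == k)) := by
      rw [numLead] at h1
      rw [hLk]
      exact List.mem_singleton_self l
    rw [List.mem_filter, Bool.and_eq_true, beq_iff_eq] at hlmem
    obtain ⟨hlcl, hllead, hlcol⟩ := hlmem
    have hlcells : l ∈ cellsOf g N M k := mem_cellsOf.2 ⟨mem_cellList.1 hlcl, hlcol⟩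
    obtain ⟨c0, tl, hc⟩ : ∃ c0 tl, cellsOf g N M k = c0 :: tl := by
      cases hcs : cellsOf g N M k with
      | nil => rw [hcs] at hlcells; cases hlcells
      | cons a t => exact ⟨a, t, rfl⟩
    obtain ⟨hc0lead, hc0col, hc0inb⟩ := head_cellsOf_leader hc
    have hc0Lk : c0 ∈ (cellList N M).filter
        (fun p => leaderB g N M p && (cellAt g p.1 p.2 == k)) := by
      rw [List.mem_filter, Bool.and_eq_true, beq_iff_eq]
      exact ⟨mem_cellList.2 hc0inb, hc0lead, hc0col⟩
    rw [hLk, List.mem_singleton] at hc0Lk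
    refine ⟨c0, tl, hc, ?_⟩
    intro q hqc
    obtain ⟨hqi, hqcol⟩ := mem_cellsOf.1 hqc
    obtain ⟨lq, hlqlead, hlqcol, hlqre⟩ := exists_leader_reaching (g := g) hqi
    have hlqLk : lq ∈ (cellList N M).filter
        (fun p => leaderB g N M p && (cellAt g p.1 p.2 == k)) := by
      rw [List.mem_filter, Bool.and_eq_true, beq_iff_eq]
      have hlqi : inb N M lq := reach_inb (reach_symm hlqre) hqi
      exact ⟨mem_cellList.2 hlqi, hlqlead, by rw [hlqcol, hqcol]⟩
    rw [hLk, List.mem_singleton] at hlqLk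
    rw [← hc0Lk, ← hlqLk] at *
    exact hlqre
  · rintro ⟨c0, tl, hc, hall⟩
    obtain ⟨hc0lead, hc0col, hc0inb⟩ := head_cellsOf_leader hc
    have hc0Lk : c0 ∈ (cellList N M).filter
        (fun p => leaderB g N M p && (cellAt g p.1 p.2 == k)) := by
      rw [List.mem_filter, Bool.and_eq_true, beq_iff_eq]
      exact ⟨mem_cellList.2 hc0inb, hc0lead, hc0col⟩
    have hallc0 : ∀ x ∈ (cellList N M).filter
        (fun p => leaderB g N M p && (cellAt g p.1 p.2 == k)), x = c0 := by
      intro x hx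
      rw [List.mem_filter, Bool.and_eq_true, beq_iff_eq] at hx
      obtain ⟨hxcl, hxlead, hxcol⟩ := hx
      have hxcells : x ∈ cellsOf g N M k := mem_cellsOf.2 ⟨mem_cellList.1 hxcl, hxcol⟩
      have hre : Reach g N M c0 x := hall x hxcells
      exact (leader_unique hc0lead hxlead hre hc0inb (mem_cellList.1 hxcl)).symm
    rw [numLead]
    have hnd : ((cellList N M).filter
        (fun p => leaderB g N M p && (cellAt g p.1 p.2 == k))).Nodup :=
      (nodup_cellList N M).filter _
    cases hLk : (cellList N M).filter
        (fun p => leaderB g N M p && (cellAt g p.1 p.2 == k)) with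
    | nil => rw [hLk] at hc0Lk; cases hc0Lk
    | cons a t =>
        cases t with
        | nil => rfl
        | cons b t2 =>
            exfalso
            have ha : a = c0 := hallc0 a (by rw [hLk]; exact List.mem_cons_self)
            have hb : b = c0 := hallc0 b (by
              rw [hLk]; exact List.mem_cons_of_mem a List.mem_cons_self)
            rw [hLk] at hnd
            have := (List.nodup_cons.1 hnd).1
            rw [ha, hb] at this
            exact this List.mem_cons_self

theorem oneRegion_iff {g : List (List Char)} {N M : Nat} {k : Char}
    {c0 : Int × Int} {tl : List (Int × Int)} (hc : cellsOf g N M k = c0 :: tl) :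
    oneRegion (cellsOf g N M k) = true ↔ ∀ q ∈ cellsOf g N M k, Reach g N M c0 q := by
  obtain ⟨hc0lead, hc0col, hc0inb⟩ := head_cellsOf_leader hc
  have hcomp : compSet g N M c0 =
      growRegion (cellsOf g N M k) (cellsOf g N M k).length [c0] := by
    rw [compSet, hc0col]
  have hmemR : ∀ q, q ∈ growRegion (cellsOf g N M k) (cellsOf g N M k).length [c0] ↔
      Reach g N M c0 q := by
    intro q
    rw [← hcomp]
    exact mem_compSet hc0inb
  have hc0cells : c0 ∈ cellsOf g N M k := by rw [hc]; exact List.mem_cons_self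
  obtain ⟨hRnd, hRsub⟩ := grow_nodup_subset (nodup_cellsOf g N M k)
      (cellsOf g N M k).length [c0] (List.nodup_singleton c0)
  have hRsub' : growRegion (cellsOf g N M k) (cellsOf g N M k).length [c0] ⊆
      cellsOf g N M k := by
    intro x hx
    rcases hRsub x hx with hx2 | hx2
    · rw [List.mem_singleton] at hx2; subst hx2; exact hc0cells
    · exact hx2
  have hone : oneRegion (cellsOf g N M k) =
      ((growRegion (cellsOf g N M k) (cellsOf g N M k).length [c0]).length ==
        (cellsOf g N M k).length) := by
    conv_lhs => rw [hc]
    rw [oneRegion]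
    rw [← hc]
  rw [hone]
  constructor
  · intro h
    rw [beq_iff_eq] at h
    have hsup := subset_of_nodup_of_length hRnd (nodup_cellsOf g N M k) hRsub' (le_of_eq h.symm)
    intro q hq
    exact (hmemR q).1 (hsup hq)
  · intro h
    rw [beq_iff_eq]
    refine Nat.le_antisymm (nodup_subset_length hRnd hRsub') (nodup_subset_length (nodup_cellsOf g N M k) ?_)
    intro q hq
    exact (hmemR q).2 (h q hq)


theorem colorCells_getD (rows : List (List Char)) (N M : Nat)
    (fill : PySem.Dict (Int × Int) Char) (k : Char) :
    PySem.Dict.getD (colorCells rows N M fill) k [] =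
      (cellList N M).filter
        (fun p => ((PySem.Dict.get? fill p).getD (cellAt rows p.1 p.2)) == k) := by
  rw [colorCells, PySem.Dict.getD_foldl_modify_append]
  rw [List.filter_map, List.map_map]
  have h1 : ((fun (x : Char × (Int × Int)) => x.2) ∘
      (fun p : Int × Int => ((PySem.Dict.get? fill p).getD (cellAt rows p.1 p.2), p))) = id := rfl
  have h2 : ((fun (x : Char × (Int × Int)) => x.1 == k) ∘
      (fun p : Int × Int => ((PySem.Dict.get? fill p).getD (cellAt rows p.1 p.2), p))) =
      (fun p : Int × Int => (PySem.Dict.get? fill p).getD (cellAt rows p.1 p.2) == k) := rfl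
  rw [h1, h2, List.map_id, PySem.Dict.getD_empty, List.nil_append]

theorem colorCells_contains (rows : List (List Char)) (N M : Nat)
    (fill : PySem.Dict (Int × Int) Char) (k : Char) :
    PySem.Dict.contains (colorCells rows N M fill) k = true ↔
      ∃ p ∈ cellList N M, ((PySem.Dict.get? fill p).getD (cellAt rows p.1 p.2)) = k := by
  rw [colorCells, PySem.Dict.contains_iff_mem_keys,
    PySem.Dict.keys_foldl_modify_key
      ((cellList N M).map (fun p => ((PySem.Dict.get? fill p).getD (cellAt rows p.1 p.2), p)))
      (fun cp => cp.1) [] (fun _ cp => (fun xs => xs ++ [cp.2])) PySem.Dict.empty]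
  rw [PySem.Dict.keys_empty, PySem.Set.update_nil_left]
  rw [PySem.Set.mem_ofList]
  simp [List.map_map, Function.comp, eq_comm]

theorem get?_foldl_insert {κ ν : Type} [BEq κ] [LawfulBEq κ] :
    ∀ (l : List (κ × ν)) (d0 : PySem.Dict κ ν) (p : κ), (l.map (·.1)).Nodup →
      (l.foldl (fun d pc => PySem.Dict.insert d pc.1 pc.2) d0).get? p =
        ((l.find? (fun pc => pc.1 == p)).map (fun pc => pc.2)).or (d0.get? p) := by
  intro l
  induction l with
  | nil => intro d0 p _; rfl
  | cons pc l ih =>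
      intro d0 p hnd
      rw [List.foldl_cons]
      have hndl : (l.map (·.1)).Nodup := (List.nodup_cons.1 (by simpa using hnd)).2
      rw [ih _ p hndl]
      by_cases hk : pc.1 = p
      · subst hk
        have hfind : l.find? (fun pc' => pc'.1 == pc.1) = none := by
          rw [List.find?_eq_none]
          intro x hx
          simp only [beq_iff_eq]
          intro hcontra
          have : pc.1 ∈ l.map (·.1) := List.mem_map.2 ⟨x, hx, hcontra⟩
          exact (List.nodup_cons.1 (by simpa using hnd)).1 this
        rw [hfind, List.find?_cons_of_pos (by simp)]
        simp [PySem.Dict.get?_insert_self]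
      · rw [List.find?_cons_of_neg (by simp [hk])]
        rcases hfind : l.find? (fun pc' => pc'.1 == p) with _ | pc'
        · rw [hfind]
          simp only [Option.map_none, Option.none_or]
          apply PySem.Dict.get?_insert_of_ne
          exact fun h => hk h.symm
        · rw [hfind]
          simp

theorem fillGrid_cellAt :
    ∀ (l : List ((Int × Int) × Char)) (rows : List (List Char)),
      (l.map (·.1)).Nodup →
      (∀ pc ∈ l, 0 ≤ pc.1.1 ∧ 0 ≤ pc.1.2 ∧ pc.1.1.toNat < rows.length ∧
          pc.1.2.toNat < (rows.getD pc.1.1.toNat []).length) →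
      ∀ p : Int × Int, 0 ≤ p.1 → 0 ≤ p.2 →
        cellAt (fillGrid rows l) p.1 p.2 =
          ((l.find? (fun pc => pc.1 == p)).map (fun pc => pc.2)).getD (cellAt rows p.1 p.2) := by
  intro l
  induction l with
  | nil => intro rows _ _ p _ _; rfl
  | cons qc l ih =>
      intro rows hnd hin p hp1 hp2
      obtain ⟨hq1, hq2, hq3, hq4⟩ := hin qc List.mem_cons_self
      have hfill : fillGrid rows (qc :: l) =
          fillGrid (rows.set qc.1.1.toNat ((rows.getD qc.1.1.toNat []).set qc.1.2.toNat qc.2)) l := by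
        rw [fillGrid, List.foldl_cons, ← fillGrid]
      rw [hfill]
      have hndl : (l.map (·.1)).Nodup := (List.nodup_cons.1 (by simpa using hnd)).2
      have hin' : ∀ pc ∈ l, 0 ≤ pc.1.1 ∧ 0 ≤ pc.1.2 ∧
          pc.1.1.toNat < (rows.set qc.1.1.toNat ((rows.getD qc.1.1.toNat []).set qc.1.2.toNat qc.2)).length ∧
          pc.1.2.toNat < ((rows.set qc.1.1.toNat ((rows.getD qc.1.1.toNat []).set qc.1.2.toNat qc.2)).getD pc.1.1.toNat []).length := by
        intro pc hpc
        obtain ⟨c1, c2, c3, c4⟩ := hin pc (List.mem_cons_of_mem qc hpc)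
        refine ⟨c1, c2, by rwa [List.length_set], ?_⟩
        rw [getD_set']
        by_cases h : qc.1.1.toNat = pc.1.1.toNat ∧ qc.1.1.toNat < rows.length
        · rw [if_pos h, List.length_set]
          rw [← h.1] at c4
          exact c4
        · rw [if_neg h]
          exact c4
      rw [ih _ hndl hin' p hp1 hp2]
      by_cases hqp : qc.1 = p
      · rw [List.find?_cons_of_pos (by simp [hqp])]
        have hfind : l.find? (fun pc => pc.1 == p) = none := by
          rw [List.find?_eq_none]
          intro x hx
          simp only [beq_iff_eq]
          intro hcontra
          have : p ∈ l.map (·.1) := List.mem_map.2 ⟨x, hx, hcontra⟩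
          rw [← hqp] at this
          exact (List.nodup_cons.1 (by simpa using hnd)).1 this
        rw [hfind]
        simp only [Option.map_none, Option.getD_none, Option.map_some, Option.getD_some]
        rw [← hqp]
        rw [cellAt, getD_set', if_pos ⟨rfl, hq3⟩, getD_set', if_pos ⟨rfl, hq4⟩]
      · rw [List.find?_cons_of_neg (by simp [hqp])]
        rcases hfind : l.find? (fun pc => pc.1 == p) with _ | pc'
        · rw [hfind]
          simp only [Option.map_none, Option.getD_none]
          rw [cellAt, cellAt, getD_set']
          by_cases hi : qc.1.1.toNat = p.1.toNat ∧ qc.1.1.toNat < rows.length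
          · have hieq : qc.1.1 = p.1 := by omega
            have hjne : qc.1.2 ≠ p.2 := by
              intro h
              exact hqp (Prod.ext hieq h)
            rw [if_pos hi, getD_set', if_neg (by omega), hi.1]
          · rw [if_neg hi]
        · rw [hfind]
          simp

theorem pyProduct3_len : ∀ (n : Nat) (pool : List Char), pool ∈ pyProduct3 n → pool.length = n := by
  intro n
  induction n with
  | zero =>
      intro pool h
      rw [pyProduct3] at h
      rw [List.mem_singleton] at h
      subst h
      rfl
  | succ m ih =>
      intro pool h
      rw [pyProduct3] at h
      rw [List.mem_flatMap] at h
      obtain ⟨c, _, hmem⟩ := h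
      rw [List.mem_map] at hmem
      obtain ⟨p', hp', rfl⟩ := hmem
      rw [List.length_cons, ih p' hp']

theorem inner_fold_mem (s : String) :
    ∀ (cs : List Char) (mg : List Char) (x : Char),
      x ∈ cs.foldl (fun mg c => if c ∈ s.toList ∧ c ∉ mg then mg ++ [c] else mg) mg ↔
        x ∈ mg ∨ (x ∈ cs ∧ x ∈ s.toList) := by
  intro cs
  induction cs with
  | nil => intro mg x; simp
  | cons c cs ih =>
      intro mg x
      rw [List.foldl_cons, ih]
      by_cases hc : c ∈ s.toList ∧ c ∉ mg
      · rw [if_pos hc]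
        simp only [List.mem_append, List.mem_cons]
        by_cases hxc : x = c
        · subst hxc
          tauto
        · tauto
      · rw [if_neg hc]
        simp only [List.mem_cons]
        by_cases hxc : x = c
        · subst hxc
          tauto
        · tauto

theorem myground_mem (grid : List String) (x : Char) :
    x ∈ grid.foldl (fun mg s => (['a', 'b', 'c'] : List Char).foldl
        (fun mg c => if c ∈ s.toList ∧ c ∉ mg then mg ++ [c] else mg) mg) [] ↔
      (x ∈ (['a', 'b', 'c'] : List Char) ∧ ∃ s ∈ grid, x ∈ s.toList) := by
  suffices h : ∀ (mg : List Char),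
      x ∈ grid.foldl (fun mg s => (['a', 'b', 'c'] : List Char).foldl
        (fun mg c => if c ∈ s.toList ∧ c ∉ mg then mg ++ [c] else mg) mg) mg ↔
      x ∈ mg ∨ (x ∈ (['a', 'b', 'c'] : List Char) ∧ ∃ s ∈ grid, x ∈ s.toList) by
    rw [h []]
    simp
  induction grid with
  | nil => intro mg; simp
  | cons s grid ih =>
      intro mg
      rw [List.foldl_cons, ih, inner_fold_mem]
      constructor
      · rintro (( h | h) | h)
        · exact Or.inl h
        · exact Or.inr ⟨h.1, s, List.mem_cons_self, h.2⟩
        · exact Or.inr ⟨h.1, by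
            obtain ⟨t, ht, hxt⟩ := h.2
            exact ⟨t, List.mem_cons_of_mem s ht, hxt⟩⟩
      · rintro (h | ⟨habc, t, ht, hxt⟩)
        · exact Or.inl (Or.inl h)
        · rcases List.mem_cons.1 ht with rfl | ht2
          · exact Or.inl (Or.inr ⟨habc, hxt⟩)
          · exact Or.inr ⟨habc, t, ht2, hxt⟩

theorem foldl_count_congr {α : Type} (l : List α) (f h : α → Bool)
    (hfh : ∀ x ∈ l, f x = h x) :
    ∀ a : Int, l.foldl (fun acc x => if f x then acc + 1 else acc) a =
      l.foldl (fun acc x => if h x then acc + 1 else acc) a := by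
  induction l with
  | nil => intro a; rfl
  | cons x l ih =>
      intro a
      rw [List.foldl_cons, List.foldl_cons, hfh x List.mem_cons_self]
      exact ih (fun y hy => hfh y (List.mem_cons_of_mem x hy)) _


theorem pool_eq {N M : Nat} (rows : List (List Char)) (hrows : rows.length = N)
    (qidx : List (Int × Int))
    (hq : qidx = (cellList N M).filter (fun p => cellAt rows p.1 p.2 = '?'))
    (pool : List Char) (hlen : pool.length = qidx.length)
    (keysA keysB : List Char) (hkeys : ∀ x, x ∈ keysA ↔ x ∈ keysB) :
    checkA (fillGrid rows (qidx.zip pool)) N M keysA =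
    keysB.all (fun k =>
      PySem.Dict.contains (colorCells rows N M (PySem.Dict.ofList (qidx.zip pool))) k &&
      oneRegion (PySem.Dict.getD (colorCells rows N M (PySem.Dict.ofList (qidx.zip pool))) k [])) := by
  have hnd : ((qidx.zip pool).map (·.1)).Nodup := by
    rw [List.map_fst_zip (le_of_eq hlen.symm)]
    rw [hq]
    exact (nodup_cellList N M).filter _
  have hin : ∀ pc ∈ qidx.zip pool, 0 ≤ pc.1.1 ∧ 0 ≤ pc.1.2 ∧
      pc.1.1.toNat < rows.length ∧ pc.1.2.toNat < (rows.getD pc.1.1.toNat []).length := by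
    intro pc hpc
    obtain ⟨a, c⟩ := pc
    have hmem : a ∈ qidx := (List.of_mem_zip hpc).1
    rw [hq, List.mem_filter, decide_eq_true_iff] at hmem
    obtain ⟨hcl, hpred⟩ := hmem
    have hinb : inb N M a := mem_cellList.1 hcl
    obtain ⟨h1, h2, h3, h4⟩ := hinb
    refine ⟨h1, h3, ?_, ?_⟩
    · show a.1.toNat < rows.length
      rw [hrows]
      omega
    · show a.2.toNat < (rows.getD a.1.toNat []).length
      by_contra hcon
      rw [cellAt, List.getD_eq_default _ _ (Nat.le_of_not_lt hcon)] at hpred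
      cases hpred
  have hover : ∀ p ∈ cellList N M,
      ((PySem.Dict.ofList (qidx.zip pool)).get? p).getD (cellAt rows p.1 p.2) =
        cellAt (fillGrid rows (qidx.zip pool)) p.1 p.2 := by
    intro p hp
    have hinb : inb N M p := mem_cellList.1 hp
    have hofl : PySem.Dict.ofList (qidx.zip pool) =
        (qidx.zip pool).foldl (fun d pc => PySem.Dict.insert d pc.1 pc.2) PySem.Dict.empty := rfl
    rw [hofl, get?_foldl_insert _ _ _ hnd, PySem.Dict.get?_empty, Option.or_none,
      fillGrid_cellAt _ _ hnd hin p hinb.1 hinb.2.2.1]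
  have hcells : ∀ k, PySem.Dict.getD (colorCells rows N M (PySem.Dict.ofList (qidx.zip pool))) k []
      = cellsOf (fillGrid rows (qidx.zip pool)) N M k := by
    intro k
    rw [colorCells_getD, cellsOf]
    apply List.filter_congr
    intro p hp
    rw [hover p hp]
  have hcont : ∀ k, PySem.Dict.contains
      (colorCells rows N M (PySem.Dict.ofList (qidx.zip pool))) k = true ↔
      cellsOf (fillGrid rows (qidx.zip pool)) N M k ≠ [] := by
    intro k
    rw [colorCells_contains]
    constructor
    · rintro ⟨p, hp, hpk⟩
      rw [hover p hp] at hpk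
      intro hnil
      rw [cellsOf, List.filter_eq_nil_iff] at hnil
      exact hnil p hp (by simp [hpk])
    · intro hne
      rcases hcs : cellsOf (fillGrid rows (qidx.zip pool)) N M k with _ | ⟨c0, tl⟩
      · exact absurd hcs hne
      · have hc0 : c0 ∈ cellsOf (fillGrid rows (qidx.zip pool)) N M k := by
          rw [hcs]; exact List.mem_cons_self
        obtain ⟨hc0i, hc0c⟩ := mem_cellsOf.1 hc0
        refine ⟨c0, mem_cellList.2 hc0i, ?_⟩
        rw [hover c0 (mem_cellList.2 hc0i)]
        exact hc0c
  apply Bool.coe_iff_coe.mp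
  rw [checkA_iff, List.all_eq_true]
  constructor
  · intro h k hk
    have h1 := h k ((hkeys k).2 hk)
    rw [numLead_bridge] at h1
    obtain ⟨c0, tl, hcs, hall⟩ := h1
    rw [Bool.and_eq_true]
    refine ⟨(hcont k).2 (by rw [hcs]; simp), ?_⟩
    rw [hcells k, (oneRegion_iff hcs)]
    exact hall
  · intro h k hk
    have h1 := h k ((hkeys k).1 hk)
    rw [Bool.and_eq_true, hcells k] at h1
    obtain ⟨hc, ho⟩ := h1
    rcases hcs : cellsOf (fillGrid rows (qidx.zip pool)) N M k with _ | ⟨c0, tl⟩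
    · exact absurd hcs ((hcont k).1 hc)
    · rw [numLead_bridge]
      exact ⟨c0, tl, hcs, (oneRegion_iff hcs).1 (by rwa [hcs] at ho ⊢)⟩

-- ===== VERDICT (by name: the statement is the Claim_ definition above) =====
theorem solution_spec : Claim_equal_solution := by
  intro grid hdom hpre
  unfold Spec_solution
  cases grid with
  | nil => rfl
  | cons g0 rest =>
      simp only [solution, solution_alt]
      refine foldl_count_congr _ _ _ ?_ 0
      intro pool hpool
      have hlen := pyProduct3_len _ pool hpool
      have hkeys : ∀ x : Char,
          (x ∈ (g0 :: rest).foldl (fun mg s => (['a', 'b', 'c'] : List Char).foldl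
              (fun mg c => if c ∈ s.toList ∧ c ∉ mg then mg ++ [c] else mg) mg) [] ++
            (['a', 'b', 'c'] : List Char).filter (fun c =>
              c ∉ (g0 :: rest).foldl (fun mg s => (['a', 'b', 'c'] : List Char).foldl
                (fun mg c => if c ∈ s.toList ∧ c ∉ mg then mg ++ [c] else mg) mg) [] ∧
              c ∈ pool)) ↔
          (x ∈ (['a', 'b', 'c'] : List Char).filter (fun c =>
              (g0 :: rest).any (fun row => c ∈ row.toList)) ++
            (['a', 'b', 'c'] : List Char).filter (fun c =>
              c ∉ (['a', 'b', 'c'] : List Char).filter (fun c =>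
                (g0 :: rest).any (fun row => c ∈ row.toList)) ∧ c ∈ pool)) := by
        intro x
        have hmg := myground_mem (g0 :: rest) x
        simp only [List.mem_append, List.mem_filter, decide_eq_true_iff, List.any_eq_true,
          hmg] at *
      exact pool_eq ((g0 :: rest).map String.toList) (by rw [List.length_map])
        _ rfl pool (by rw [hlen]) _ _ hkeys
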